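-- pv_equiv track=rewrite | github.com/22bai70154Balaji/indian-legal-kag | config/constitutional_articles.py | determine_part
-- ===== SOURCE A (Python) =====
-- def determine_part(article_num: int) -> str:
--     """Determine constitutional part based on article number"""
--     part_ranges = {
--         "I": (1, 4), "II": (5, 11), "III": (12, 35), "IV": (36, 51),
--         "V": (52, 151), "VI": (152, 237), "VIII": (239, 242),
--         "IX": (243, 243), "X": (244, 244), "XI": (245, 263),
--         "XII": (264, 300), "XIII": (301, 307), "XIV": (308, 323),
--         "XV": (324, 329), "XVI": (330, 342), "XVII": (343, 351),
--         "XVIII": (352, 360), "XIX": (361, 367), "XX": (368, 368),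
--         "XXI": (369, 392), "XXII": (393, 395)
--     }
--     for part, (start, end) in part_ranges.items():
--         if start <= article_num <= end:
--             return part
--     return "Other"
-- ===== SOURCE B (Python) =====
-- # Sorted parallel arrays of range starts/ends/parts; per call a hand-written
-- # binary search (bisect_right on the starts) finds the candidate range.
-- _STARTS = [1, 5, 12, 36, 52, 152, 239, 243, 244, 245, 264,
--            301, 308, 324, 330, 343, 352, 361, 368, 369, 393]
-- _ENDS = [4, 11, 35, 51, 151, 237, 242, 243, 244, 263, 300,
--          307, 323, 329, 342, 351, 360, 367, 368, 392, 395]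
-- _PARTS = ["I", "II", "III", "IV", "V", "VI", "VIII", "IX", "X", "XI", "XII",
--           "XIII", "XIV", "XV", "XVI", "XVII", "XVIII", "XIX", "XX", "XXI", "XXII"]
--
--
-- def determine_part(article_num: int) -> str:
--     """Determine constitutional part based on article number"""
--     lo, hi = 0, len(_STARTS)
--     while lo < hi:  # bisect_right over the range starts
--         mid = (lo + hi) // 2
--         if _STARTS[mid] <= article_num:
--             lo = mid + 1
--         else:
--             hi = mid
--     if lo == 0:
--         return "Other"  # below the first range
--     return _PARTS[lo - 1] if article_num <= _ENDS[lo - 1] else "Other"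
-- ===== Notes on version B (the rewrite author's own statement) =====
-- stated objective: alternative
-- what changed: Replaced the per-call linear scan over an (start,end) range dict with a binary search (hand-written bisect_right) over sorted parallel arrays of range starts, then a single end-bound check, defaulting to 'Other' in gaps and out of range.
import Mathlib
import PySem

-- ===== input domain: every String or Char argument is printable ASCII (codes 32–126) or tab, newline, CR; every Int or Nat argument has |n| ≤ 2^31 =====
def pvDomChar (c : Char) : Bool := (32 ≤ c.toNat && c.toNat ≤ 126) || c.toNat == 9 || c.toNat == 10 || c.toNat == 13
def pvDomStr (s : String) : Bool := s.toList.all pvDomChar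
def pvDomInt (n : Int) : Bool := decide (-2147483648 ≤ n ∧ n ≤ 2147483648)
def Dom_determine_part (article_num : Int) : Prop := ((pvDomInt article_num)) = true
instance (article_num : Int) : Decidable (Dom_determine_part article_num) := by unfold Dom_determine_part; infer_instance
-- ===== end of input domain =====

-- B replaces A's per-call linear scan over the range dict with a binary search
-- (hand-written bisect_right) over sorted parallel arrays of range starts plus one
-- end-bound check (objective: alternative algorithm).


-- ===== PORT A =====
-- part_ranges as an insertion-ordered association list (String × (start, end))
def partRangesA : List (String × Int × Int) :=
  [("I",1,4),("II",5,11),("III",12,35),("IV",36,51),("V",52,151),("VI",152,237),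
   ("VIII",239,242),("IX",243,243),("X",244,244),("XI",245,263),("XII",264,300),
   ("XIII",301,307),("XIV",308,323),("XV",324,329),("XVI",330,342),("XVII",343,351),
   ("XVIII",352,360),("XIX",361,367),("XX",368,368),("XXI",369,392),("XXII",393,395)]

-- 'for part, (start, end) in part_ranges.items(): if start <= n <= end: return part'; fall through: "Other"
def scanA (article_num : Int) : List (String × Int × Int) → String
  | [] => "Other"
  | (part, s, e) :: rest =>
      if s ≤ article_num ∧ article_num ≤ e then part else scanA article_num rest

def determine_part (article_num : Int) : String := scanA article_num partRangesA

-- ===== PORT B =====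
def startsB : List Int :=
  [1, 5, 12, 36, 52, 152, 239, 243, 244, 245, 264, 301, 308, 324, 330, 343, 352, 361, 368, 369, 393]
def endsB : List Int :=
  [4, 11, 35, 51, 151, 237, 242, 243, 244, 263, 300, 307, 323, 329, 342, 351, 360, 367, 368, 392, 395]
def partsB : List String :=
  ["I", "II", "III", "IV", "V", "VI", "VIII", "IX", "X", "XI", "XII",
   "XIII", "XIV", "XV", "XVI", "XVII", "XVIII", "XIX", "XX", "XXI", "XXII"]

-- the 'while lo < hi' bisect_right loop; fuel = the initial gap hi - lo bounds the
-- iteration count (the gap shrinks every step), so with fuel ≥ hi - lo this is the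
-- exact loop; indices stay in [0,21) so getD is exact on Source B's _STARTS[mid]
def bisectB (article_num : Int) : Nat → Nat → Nat → Nat
  | 0, lo, _ => lo
  | fuel + 1, lo, hi =>
      if lo < hi then
        let mid := (lo + hi) / 2
        if startsB.getD mid 0 ≤ article_num then bisectB article_num fuel (mid + 1) hi
        else bisectB article_num fuel lo mid
      else lo

def determine_part_alt (article_num : Int) : String :=
  let lo := bisectB article_num startsB.length 0 startsB.length
  if lo = 0 then "Other"
  else if article_num ≤ endsB.getD (lo - 1) 0 then partsB.getD (lo - 1) "Other"
  else "Other"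

-- ===== PRECONDITION & SPEC =====
def Spec_determine_part (article_num : Int) (out : String) : Prop := out = determine_part_alt article_num
instance (article_num : Int) (out : String) : Decidable (Spec_determine_part article_num out) := by unfold Spec_determine_part; infer_instance

-- ===== CLAIM (what is proved, stated in full; the proofs are below) =====
def Claim_equal_determine_part : Prop := ∀ (article_num : Int), Dom_determine_part article_num → Spec_determine_part article_num (determine_part article_num)

-- ===== LEMMAS AND PROOFS =====

lemma scanA_other (n : Int) (h : n < 0 ∨ 396 < n) :
    ∀ l : List (String × Int × Int), (∀ p ∈ l, 0 ≤ p.2.1 ∧ p.2.2 ≤ 396) → scanA n l = "Other"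
  | [], _ => rfl
  | (part, s, e) :: rest, hb => by
      have h1 := hb (part, s, e) (List.mem_cons_self ..)
      have hrest : ∀ p ∈ rest, 0 ≤ p.2.1 ∧ p.2.2 ≤ 396 :=
        fun p hp => hb p (List.mem_cons_of_mem _ hp)
      simp only [scanA]
      rw [if_neg (by simp at h1 ⊢; omega)]
      exact scanA_other n h rest hrest

lemma a_other_of_out_of_range (n : Int) (h : n < 0 ∨ 396 < n) :
    determine_part n = "Other" :=
  scanA_other n h partRangesA (by decide)

-- when n is below every start, bisect_right returns lo
lemma bisect_low (n : Int) (h : ∀ m, m < startsB.length → n < startsB.getD m 0) :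
    ∀ fuel lo hi, hi ≤ startsB.length → hi - lo ≤ fuel → bisectB n fuel lo hi = lo := by
  intro fuel
  induction fuel with
  | zero => intro lo hi _ hf; simp only [bisectB]
  | succ k ih =>
      intro lo hi hlen hf
      simp only [bisectB]
      split_ifs with h1 h2
      · exact absurd h2 (not_le.mpr (h _ (by omega)))
      · exact ih lo ((lo + hi) / 2) (by omega) (by omega)
      · rfl

-- when n is at or above every start, bisect_right returns hi
lemma bisect_high (n : Int) (h : ∀ m, m < startsB.length → startsB.getD m 0 ≤ n) :
    ∀ fuel lo hi, lo ≤ hi → hi ≤ startsB.length → hi - lo ≤ fuel → bisectB n fuel lo hi = hi := by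
  intro fuel
  induction fuel with
  | zero => intro lo hi hlh _ hf; simp only [bisectB]; omega
  | succ k ih =>
      intro lo hi hlh hlen hf
      simp only [bisectB]
      split_ifs with h1 h2
      · exact ih ((lo + hi) / 2 + 1) hi (by omega) hlen (by omega)
      · exact absurd (h _ (by omega)) (not_le.mpr (not_le.mp h2))
      · omega

lemma alt_other_of_out_of_range (n : Int) (h : n < 0 ∨ 396 < n) :
    determine_part_alt n = "Other" := by
  unfold determine_part_alt
  rcases h with h | h
  · rw [bisect_low n (fun m hm => by
        simp only [startsB, List.length] at hm; interval_cases m <;> simp [startsB] <;> omega)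
        startsB.length 0 startsB.length le_rfl (by simp)]
    rfl
  · rw [bisect_high n (fun m hm => by
        simp only [startsB, List.length] at hm; interval_cases m <;> simp [startsB] <;> omega)
        startsB.length 0 startsB.length (by simp) le_rfl (by simp)]
    norm_num [startsB, endsB]
    omega

set_option maxRecDepth 100000 in
set_option maxHeartbeats 4000000 in
lemma in_range_agree : ∀ n ∈ PySem.List.pyRange 0 397 1, determine_part n = determine_part_alt n := by
  decide

-- ===== VERDICT (by name: the statement is the Claim_ definition above) =====
theorem determine_part_spec : Claim_equal_determine_part := by
  intro n _
  unfold Spec_determine_part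
  by_cases h : 0 ≤ n ∧ n < 397
  · exact in_range_agree n (PySem.List.mem_pyRange_one.mpr h)
  · have h' : n < 0 ∨ 396 < n := by omega
    rw [a_other_of_out_of_range n h', alt_other_of_out_of_range n h']
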